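-- pv_equiv track=rewrite | github.com/richedperson1/DSA | recurssion/881. Boats to Save People.py | boat_save
-- ===== SOURCE A (Python) =====
-- def boat_save(arr, ind, sumi, total):
--     n = len(arr)
--     if ind >= n:
--         return 1
--     if sumi == total:
--         return 1
--
--     inc = 0
--     if sumi+arr[ind] <= total:
--         inc = boat_save(arr, ind+1, sumi+arr[ind], total)
--         return inc
--     else:
--         exc1 = boat_save(arr, ind+1, 0, total)
--         exc2 = boat_save(arr, ind+1, sumi, total)
--         return min(exc1, exc2)+1
-- ===== SOURCE B (Python) =====
-- def boat_save(arr, ind, sumi, total):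
--     n = len(arr)
--     memo = {}
--
--     def go(ind, sumi):
--         if ind >= n:
--             return 1
--         if sumi == total:
--             return 1
--         key = (ind, sumi)
--         if key in memo:
--             return memo[key]
--         if sumi + arr[ind] <= total:
--             res = go(ind + 1, sumi + arr[ind])
--         else:
--             res = min(go(ind + 1, 0), go(ind + 1, sumi)) + 1
--         memo[key] = res
--         return res
--
--     return go(ind, sumi)
-- ===== Notes on version B (the rewrite author's own statement) =====
-- stated objective: alternative
-- what changed: Replaces the plain exponential two-branch recursion by the same recursion memoized on the (ind, sumi) state in a dictionary, so each state is solved once; intended as faster (a timing run measured B 4.5x at the largest size both finished and A timing out beyond it, but could not confirm the ratio at larger sizes), recorded here as unconfirmed.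
import Mathlib
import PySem

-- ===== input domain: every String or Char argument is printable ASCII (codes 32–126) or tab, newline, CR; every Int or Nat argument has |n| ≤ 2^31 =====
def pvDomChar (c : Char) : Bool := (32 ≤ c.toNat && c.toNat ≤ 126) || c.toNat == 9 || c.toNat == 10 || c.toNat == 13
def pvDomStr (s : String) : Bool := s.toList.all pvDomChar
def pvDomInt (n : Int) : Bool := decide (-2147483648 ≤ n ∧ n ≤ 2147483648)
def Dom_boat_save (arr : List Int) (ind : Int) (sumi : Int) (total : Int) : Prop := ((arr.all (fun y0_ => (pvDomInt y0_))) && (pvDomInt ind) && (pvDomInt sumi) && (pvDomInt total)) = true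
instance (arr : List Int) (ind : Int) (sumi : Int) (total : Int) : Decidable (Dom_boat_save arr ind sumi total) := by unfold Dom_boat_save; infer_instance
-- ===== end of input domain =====

-- B memoizes A's recursion on the (ind, sumi) state in a dictionary, so each state is solved once.

-- ===== PORT A =====
def boat_save (arr : List Int) (ind : Int) (sumi : Int) (total : Int) : Int :=
  if ind ≥ (arr.length : Int) then 1
  else if sumi = total then 1
  else
    -- Pre_ guarantees the index is in range; the .getD 0 default is never reached there
    let a := (PySem.List.pyGet? arr ind).getD 0
    if sumi + a ≤ total then boat_save arr (ind + 1) (sumi + a) total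
    else min (boat_save arr (ind + 1) 0 total) (boat_save arr (ind + 1) sumi total) + 1
termination_by ((arr.length : Int) - ind).toNat
decreasing_by all_goals omega

-- ===== PORT B =====
-- Source B's inner 'go': threads the memo dictionary through and returns (result, memo)
def boatSaveGo (arr : List Int) (total : Int) (ind : Int) (sumi : Int)
    (memo : PySem.Dict (Int × Int) Int) : Int × PySem.Dict (Int × Int) Int :=
  if ind ≥ (arr.length : Int) then (1, memo)
  else if sumi = total then (1, memo)
  else
    match memo.get? (ind, sumi) with
    | some v => (v, memo)
    | none =>
      let a := (PySem.List.pyGet? arr ind).getD 0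
      if sumi + a ≤ total then
        let p := boatSaveGo arr total (ind + 1) (sumi + a) memo
        (p.1, p.2.insert (ind, sumi) p.1)
      else
        let p1 := boatSaveGo arr total (ind + 1) 0 memo
        let p2 := boatSaveGo arr total (ind + 1) sumi p1.2
        let res := min p1.1 p2.1 + 1
        (res, p2.2.insert (ind, sumi) res)
termination_by ((arr.length : Int) - ind).toNat
decreasing_by all_goals omega

def boat_save_alt (arr : List Int) (ind : Int) (sumi : Int) (total : Int) : Int :=
  (boatSaveGo arr total ind sumi PySem.Dict.empty).1

-- ===== PRECONDITION & SPEC =====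
-- Pre_ excludes exactly the inputs where A raises IndexError: ind below -len(arr) with sumi ≠ total
-- reaches arr[ind] out of range (B raises there too).
def Pre_boat_save (arr : List Int) (ind : Int) (sumi : Int) (total : Int) : Prop :=
  -(arr.length : Int) ≤ ind ∨ sumi = total
instance (arr : List Int) (ind : Int) (sumi : Int) (total : Int) : Decidable (Pre_boat_save arr ind sumi total) := by unfold Pre_boat_save; infer_instance

def pvWitness_boat_save : List Int × Int × Int × Int := ([1, 2, 3], 0, 0, 3)

def Spec_boat_save (arr : List Int) (ind : Int) (sumi : Int) (total : Int) (out : Int) : Prop := out = boat_save_alt arr ind sumi total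
instance (arr : List Int) (ind : Int) (sumi : Int) (total : Int) (out : Int) : Decidable (Spec_boat_save arr ind sumi total out) := by unfold Spec_boat_save; infer_instance

-- ===== CLAIM (what is proved, stated in full; the proofs are below) =====
def Claim_equal_boat_save : Prop := ∀ (arr : List Int) (ind : Int) (sumi : Int) (total : Int), Dom_boat_save arr ind sumi total → Pre_boat_save arr ind sumi total → Spec_boat_save arr ind sumi total (boat_save arr ind sumi total)

-- ===== LEMMAS AND PROOFS =====

-- memo invariant: every cached value is the plain recursion's value at its key
def BoatMemoInv (arr : List Int) (total : Int) (memo : PySem.Dict (Int × Int) Int) : Prop :=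
  ∀ k v, memo.get? k = some v → v = boat_save arr k.1 k.2 total

theorem boatSaveGo_correct (arr : List Int) (total : Int) (ind : Int) (sumi : Int)
    (memo : PySem.Dict (Int × Int) Int) (hm : BoatMemoInv arr total memo) :
    (boatSaveGo arr total ind sumi memo).1 = boat_save arr ind sumi total ∧
    BoatMemoInv arr total (boatSaveGo arr total ind sumi memo).2 := by
  revert hm
  fun_induction boatSaveGo arr total ind sumi memo with
  | case1 ind sumi memo h =>
    intro hm
    exact ⟨by rw [boat_save]; simp [h], hm⟩
  | case2 ind memo h =>
    intro hm
    exact ⟨by rw [boat_save]; simp [h], hm⟩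
  | case3 ind sumi memo h1 h2 v hv =>
    intro hm
    exact ⟨(hm (ind, sumi) v hv).trans rfl, hm⟩
  | case4 ind sumi memo h1 h2 hnone a hle p ih =>
    intro hm
    obtain ⟨ihv, ihm⟩ := ih hm
    have hstep : boat_save arr ind sumi total
        = boat_save arr (ind + 1) (sumi + (PySem.List.pyGet? arr ind).getD 0) total := by
      have hle' : sumi + (PySem.List.pyGet? arr ind).getD 0 ≤ total := hle
      rw [boat_save]; simp [h1, h2, hle']
    refine ⟨ihv.trans hstep.symm, ?_⟩
    intro k v h
    rw [PySem.Dict.get?_insert] at h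
    split at h
    · rename_i hk
      subst hk
      cases h
      exact ihv.trans hstep.symm
    · exact ihm k v h
  | case5 ind sumi memo h1 h2 hnone a hle p1 p2 res ih2 ih1 =>
    intro hm
    obtain ⟨ihv1, ihm1⟩ := ih2 hm
    obtain ⟨ihv2, ihm2⟩ := ih1 ihm1
    have hstep : boat_save arr ind sumi total
        = min (boat_save arr (ind + 1) 0 total) (boat_save arr (ind + 1) sumi total) + 1 := by
      have hle' : ¬ sumi + (PySem.List.pyGet? arr ind).getD 0 ≤ total := hle
      rw [boat_save]; simp [h1, h2, hle']
    have hres : res = boat_save arr ind sumi total := by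
      show min p1.1 p2.1 + 1 = _
      rw [hstep, ihv1, ihv2]
    refine ⟨hres, ?_⟩
    intro k v h
    rw [PySem.Dict.get?_insert] at h
    split at h
    · rename_i hk
      subst hk
      cases h
      exact hres
    · exact ihm2 k v h

-- ===== VERDICT (by name: the statement is the Claim_ definition above) =====
theorem boat_save_spec : Claim_equal_boat_save := by
  intro arr ind sumi total _ _
  unfold Spec_boat_save boat_save_alt
  exact ((boatSaveGo_correct arr total ind sumi PySem.Dict.empty
    (by intro k v h; simp [PySem.Dict.get?_empty] at h)).1).symm
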